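-- pv_equiv track=rewrite | github.com/nex-agi/NexAU | nexau/archs/sandbox/output_utils.py | resolve_cr
-- ===== SOURCE A (Python) =====
-- def resolve_cr(text: str) -> str:
--     """Resolve carriage-return overwrites, keeping only the last version of each line.
--
--     Issue #498: Simulate carriage-return overwrites, keep only the final line state
--
--     Progress bars use ``\\r`` to overwrite the current line. After ANSI stripping,
--     this simulates the terminal behavior by keeping only the final segment after
--     the last ``\\r`` on each line.
--
--     CRLF (``\\r\\n``) line endings are normalized to ``\\n`` first so that
--     Windows-style output is not destroyed.
--     """
--     # 1. Normalize CRLF to LF to protect normal line endings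
--     text = text.replace("\r\n", "\n")
--
--     # 2. Process bare \r as carriage-return overwrites
--     out_lines: list[str] = []
--     for line in text.split("\n"):
--         if "\r" in line:
--             # Keep only the segment after the last \r (what the terminal displays)
--             line = line.rsplit("\r", 1)[-1]
--         out_lines.append(line)
--     return "\n".join(out_lines)
-- ===== SOURCE B (Python) =====
-- def resolve_cr(text: str) -> str:
--     """Single character-level pass: clear the current line buffer on bare '\r',
--     flush it on '\n' (after CRLF normalization), instead of split/rsplit/join."""
--     text = text.replace("\r\n", "\n")
--     res = []
--     cur = []
--     for ch in text:
--         if ch == "\n":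
--             res.append("".join(cur))
--             cur = []
--         elif ch == "\r":
--             cur = []
--         else:
--             cur.append(ch)
--     res.append("".join(cur))
--     return "\n".join(res)
-- ===== Notes on version B (the rewrite author's own statement) =====
-- stated objective: alternative
-- what changed: Replaces A's split-into-lines, per-line rsplit-keep-last-segment, then join pipeline by a single character-level pass over the text that keeps a current-line buffer, clearing it on a bare carriage return and flushing it on a line feed.
import Mathlib
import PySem

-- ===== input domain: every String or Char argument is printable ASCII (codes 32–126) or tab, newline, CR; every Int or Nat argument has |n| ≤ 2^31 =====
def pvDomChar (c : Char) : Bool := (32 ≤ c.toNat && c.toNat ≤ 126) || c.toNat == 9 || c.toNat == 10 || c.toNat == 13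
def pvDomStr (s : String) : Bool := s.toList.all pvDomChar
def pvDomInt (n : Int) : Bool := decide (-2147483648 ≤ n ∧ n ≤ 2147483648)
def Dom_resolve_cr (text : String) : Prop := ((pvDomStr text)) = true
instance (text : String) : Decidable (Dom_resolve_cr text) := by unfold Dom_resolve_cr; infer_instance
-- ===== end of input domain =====

-- B replaces A's split/rsplit/join per-line processing by one character-level pass
-- that clears the current line buffer on '\r' (objective: alternative decomposition).

-- ===== PORT A =====
-- line.rsplit("\r", 1)[-1]: the segment of `line` after its last '\r'
-- (hand port, exact: rsplit with maxsplit=1 splits at the LAST occurrence and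
-- [-1] takes the piece after it; when '\r' ∉ line — A only calls it when '\r' ∈ line —
-- it returns line itself).
def rsplitCrLast (line : List Char) : List Char :=
  (line.reverse.takeWhile (· ≠ '\r')).reverse

def resolve_cr (text : String) : String :=
  -- 1. Normalize CRLF to LF
  let t := (PySem.Str.replace text "\r\n" "\n").toList
  -- 2. for line in text.split("\n"): keep segment after last '\r'
  let out_lines := (PySem.Chars.splitOn t ['\n']).foldl
    (fun (out : List (List Char)) line =>
      let line := if PySem.Chars.isIn ['\r'] line then rsplitCrLast line else line
      out ++ [line]) []
  String.mk (PySem.Chars.join ['\n'] out_lines)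

-- ===== PORT B =====
def resolve_cr_alt (text : String) : String :=
  let t := (PySem.Str.replace text "\r\n" "\n").toList
  -- single pass: res = finished lines, cur = current line buffer
  let st := t.foldl
    (fun (st : List (List Char) × List Char) ch =>
      if ch = '\n' then (st.1 ++ [st.2], [])
      else if ch = '\r' then (st.1, [])
      else (st.1, st.2 ++ [ch])) ([], [])
  String.mk (PySem.Chars.join ['\n'] (st.1 ++ [st.2]))

-- ===== PRECONDITION & SPEC =====
def Spec_resolve_cr (text : String) (out : String) : Prop := out = resolve_cr_alt text
instance (text : String) (out : String) : Decidable (Spec_resolve_cr text out) := by unfold Spec_resolve_cr; infer_instance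

-- ===== CLAIM (what is proved, stated in full; the proofs are below) =====
def Claim_equal_resolve_cr : Prop := ∀ (text : String), Dom_resolve_cr text → Spec_resolve_cr text (resolve_cr text)

-- ===== LEMMAS AND PROOFS =====

/-- Spec-level split on '\n' (used only in proofs). -/
def nlSplit : List Char → List (List Char)
  | [] => [[]]
  | c :: rest =>
    if c = '\n' then [] :: nlSplit rest
    else
      match nlSplit rest with
      | [] => [[c]]
      | h :: t => (c :: h) :: t

lemma modifyHead_fun_id {α : Type} (l : List α) : l.modifyHead (fun x => x) = l := by
  cases l <;> rfl

lemma nlSplit_ne_nil (l : List Char) : nlSplit l ≠ [] := by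
  cases l with
  | nil => simp [nlSplit]
  | cons c rest =>
    simp only [nlSplit]
    split
    · simp
    · split <;> simp

lemma go_spec (fuel : Nat) : ∀ (l cur : List Char) (acc : List (List Char)),
    l.length ≤ fuel →
    PySem.Chars.splitOn.go ['\n'] fuel l cur acc
      = acc.reverse ++ (nlSplit l).modifyHead (cur.reverse ++ ·) := by
  induction fuel with
  | zero =>
    intro l cur acc h
    have hl : l = [] := by cases l <;> simp_all
    subst hl
    simp [PySem.Chars.splitOn.go, nlSplit]
  | succ n ih =>
    intro l cur acc h
    cases l with
    | nil => simp [PySem.Chars.splitOn.go, nlSplit]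
    | cons c rest =>
      rw [PySem.Chars.splitOn.go]
      by_cases hc : c = '\n'
      · subst hc
        simp only [List.isPrefixOf, beq_self_eq_true, Bool.true_and,
          if_true, List.length_singleton, List.drop_succ_cons, List.drop_zero]
        rw [ih rest [] _ (by simpa using h)]
        simp [nlSplit, modifyHead_fun_id]
      · have hpre : (['\n'].isPrefixOf (c :: rest)) = false := by
          simp [List.isPrefixOf]
          exact fun h' => (hc h'.symm).elim
        rw [hpre]
        simp only [Bool.false_eq_true, if_false]
        rw [ih rest (c :: cur) acc (by simpa using Nat.le_of_succ_le_succ h)]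
        simp only [nlSplit, hc, if_false]
        rcases hh : nlSplit rest with _ | ⟨hd, tl⟩
        · exact absurd hh (nlSplit_ne_nil rest)
        · simp

lemma splitOn_eq_nlSplit (l : List Char) :
    PySem.Chars.splitOn l ['\n'] = nlSplit l := by
  have := go_spec (l.length + 1) l [] [] (by omega)
  simpa [PySem.Chars.splitOn, modifyHead_fun_id] using this

lemma rsplitCrLast_no_cr (l : List Char) (h : '\r' ∉ l) : rsplitCrLast l = l := by
  unfold rsplitCrLast
  rw [List.takeWhile_eq_self_iff.mpr, List.reverse_reverse]
  intro c hc
  simp only [decide_eq_true_eq, ne_eq]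
  intro hcr
  exact h (by simpa [hcr] using List.mem_reverse.mp hc)

lemma rsplitCrLast_append_cr (x y : List Char) :
    rsplitCrLast (x ++ '\r' :: y) = rsplitCrLast y := by
  unfold rsplitCrLast
  rw [show (x ++ '\r' :: y).reverse = y.reverse ++ '\r' :: x.reverse by simp]
  rw [List.takeWhile_append]
  split
  · next hall =>
    have h2 := List.IsPrefix.eq_of_length (List.takeWhile_prefix _) hall
    rw [List.takeWhile_cons_of_neg (by simp), List.append_nil, h2]
  · rfl

/-- A's per-line processing is `rsplitCrLast` unconditionally. -/
lemma procA_eq (line : List Char) :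
    (if PySem.Chars.isIn ['\r'] line then rsplitCrLast line else line)
      = rsplitCrLast line := by
  by_cases h : PySem.Chars.isIn ['\r'] line = true
  · simp [h]
  · have hnin : '\r' ∉ line := by
      intro hm
      obtain ⟨s, t, hst⟩ := List.append_of_mem hm
      exact h ((PySem.Chars.isIn_iff_infix ['\r'] line).mpr ⟨s, t, by simp [hst]⟩)
    simp [h, rsplitCrLast_no_cr line hnin]

lemma foldl_append_map {α β : Type} (L : List α) (f : α → β) :
    ∀ (acc : List β), L.foldl (fun out line => out ++ [f line]) acc = acc ++ L.map f := by
  induction L with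
  | nil => simp
  | cons a L ih => intro acc; simp [ih]

/-- B's fold, characterised against `nlSplit` and `rsplitCrLast`. -/
lemma fold_spec (l : List Char) :
    ∀ (res : List (List Char)) (cur : List Char), '\r' ∉ cur →
    (let st := l.foldl
        (fun (st : List (List Char) × List Char) ch =>
          if ch = '\n' then (st.1 ++ [st.2], [])
          else if ch = '\r' then (st.1, [])
          else (st.1, st.2 ++ [ch])) (res, cur)
     st.1 ++ [st.2])
      = res ++ ((nlSplit l).modifyHead (cur ++ ·)).map rsplitCrLast := by
  induction l with
  | nil =>
    intro res cur hcur
    simp [nlSplit, rsplitCrLast_no_cr cur hcur]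
  | cons c rest ih =>
    intro res cur hcur
    by_cases hn : c = '\n'
    · subst hn
      simp only [List.foldl_cons, reduceIte]
      rw [ih (res ++ [cur]) [] (by simp)]
      rcases hh : nlSplit rest with _ | ⟨hd, tl⟩
      · exact absurd hh (nlSplit_ne_nil rest)
      · simp [nlSplit, hh, rsplitCrLast_no_cr cur hcur]
    · by_cases hr : c = '\r'
      · subst hr
        simp only [List.foldl_cons, reduceIte]
        have hne : ('\r' : Char) ≠ '\n' := by decide
        rw [if_neg hne, ih res [] (by simp)]
        rcases hh : nlSplit rest with _ | ⟨hd, tl⟩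
        · exact absurd hh (nlSplit_ne_nil rest)
        · simp [nlSplit, hne, hh, rsplitCrLast_append_cr cur hd]
      · simp only [List.foldl_cons, if_neg hn, if_neg hr]
        rw [ih res (cur ++ [c]) (by
          intro hm
          rcases List.mem_append.mp hm with hm' | hm'
          · exact hcur hm'
          · simp at hm'; exact hr hm'.symm)]
        rcases hh : nlSplit rest with _ | ⟨hd, tl⟩
        · exact absurd hh (nlSplit_ne_nil rest)
        · simp [nlSplit, hn, hh]

-- ===== VERDICT (by name: the statement is the Claim_ definition above) =====
theorem resolve_cr_spec : Claim_equal_resolve_cr := by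
  intro text _
  unfold Spec_resolve_cr resolve_cr resolve_cr_alt
  simp only []
  generalize (PySem.Str.replace text "\r\n" "\n").toList = t
  rw [splitOn_eq_nlSplit]
  have hA : (nlSplit t).foldl
      (fun (out : List (List Char)) line =>
        out ++ [if PySem.Chars.isIn ['\r'] line then rsplitCrLast line else line]) []
      = (nlSplit t).map rsplitCrLast := by
    rw [show (fun (out : List (List Char)) line =>
        out ++ [if PySem.Chars.isIn ['\r'] line then rsplitCrLast line else line])
        = (fun (out : List (List Char)) line => out ++ [rsplitCrLast line]) by
      funext out line; rw [procA_eq]]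
    simpa using foldl_append_map (nlSplit t) rsplitCrLast []
  have hB := fold_spec t [] [] (by simp)
  simp only [List.nil_append] at hB
  rw [hA, hB]
  rcases hh : nlSplit t with _ | ⟨hd, tl⟩
  · exact absurd hh (nlSplit_ne_nil t)
  · simp
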